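-- pv_equiv track=rewrite | github.com/WZY2317/TokenBase | perpetual_contracts/utils/schema_generator.py | collect_all_fields
-- ===== SOURCE A (Python) =====
-- from typing import List, Dict, Set
--
-- def collect_all_fields(data_samples: List[Dict]) -> Set[str]:
--     """收集所有字段名"""
--     fields = set()
--     for sample in data_samples:
--         for key in sample.keys():
--             # API字段名为id时，重命名为api_id避免冲突
--             if key == 'id':
--                 fields.add('api_id')
--             else:
--                 fields.add(key)
--     return fields
-- ===== SOURCE B (Python) =====
-- def collect_all_fields(data_samples):
--     """收集所有字段名"""
--     if not data_samples:
--         return set()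
--     head, *rest = data_samples
--     return {('api_id' if k == 'id' else k) for k in head} | collect_all_fields(rest)
-- ===== Notes on version B (the rewrite author's own statement) =====
-- stated objective: alternative
-- what changed: Replaces A's iterative nested loops over one shared mutable accumulator by structural recursion on the sample list: each call builds the renamed key-set of the first sample and unions it with the recursive result on the rest.
import Mathlib
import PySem

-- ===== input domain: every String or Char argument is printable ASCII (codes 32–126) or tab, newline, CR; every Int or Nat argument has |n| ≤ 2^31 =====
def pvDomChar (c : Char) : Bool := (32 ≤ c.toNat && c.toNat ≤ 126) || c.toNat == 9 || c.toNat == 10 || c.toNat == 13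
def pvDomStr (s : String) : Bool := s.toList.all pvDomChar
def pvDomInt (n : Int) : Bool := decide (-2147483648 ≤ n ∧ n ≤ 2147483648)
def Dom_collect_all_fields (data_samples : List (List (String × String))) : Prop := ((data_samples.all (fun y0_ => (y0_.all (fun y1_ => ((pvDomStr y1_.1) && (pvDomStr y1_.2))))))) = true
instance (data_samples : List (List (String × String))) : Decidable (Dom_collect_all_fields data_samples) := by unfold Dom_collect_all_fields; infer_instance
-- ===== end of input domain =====

-- B recomputes the same field set by structural recursion (per-sample renamed key-set unioned with the recursive rest) instead of A's iterative nested loops; equal return value, no speed claim.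

-- ===== PORT A =====
def collect_all_fields (data_samples : List (List (String × String))) : List String :=
  data_samples.foldl (fun fields sample =>
    sample.foldl (fun fields kv =>
      if kv.1 = "id" then PySem.Set.add fields "api_id"
      else PySem.Set.add fields kv.1) fields) PySem.Set.empty

-- ===== PORT B =====
def pvRename (k : String) : String := if k = "id" then "api_id" else k

def collect_all_fields_alt : List (List (String × String)) → List String
  | [] => PySem.Set.empty
  | head :: rest =>
      PySem.Set.union (PySem.Set.ofList (head.map (fun kv => pvRename kv.1)))
        (collect_all_fields_alt rest)

-- ===== PRECONDITION & SPEC =====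
def Spec_collect_all_fields (data_samples : List (List (String × String))) (out : List String) : Prop := out = collect_all_fields_alt data_samples
instance (data_samples : List (List (String × String))) (out : List String) : Decidable (Spec_collect_all_fields data_samples out) := by unfold Spec_collect_all_fields; infer_instance

-- ===== CLAIM (what is proved, stated in full; the proofs are below) =====
def Claim_equal_collect_all_fields : Prop := ∀ (data_samples : List (List (String × String))), Dom_collect_all_fields data_samples → Spec_collect_all_fields data_samples (collect_all_fields data_samples)

-- ===== LEMMAS AND PROOFS =====

-- updating with a deduplicated list is updating with the list itself
theorem pv_update_ofList {γ : Type} [BEq γ] [LawfulBEq γ] (s : PySem.Set γ) (xs : List γ) :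
    PySem.Set.update s (PySem.Set.ofList xs) = PySem.Set.update s xs := by
  rw [PySem.Set.update_eq_append_filter, PySem.Set.update_eq_append_filter, PySem.Set.ofList_ofList]

-- both programs compute the first-occurrence dedup of the renamed, flattened key list
theorem pv_A_eq (data_samples : List (List (String × String))) :
    collect_all_fields data_samples
      = PySem.Set.ofList ((data_samples.flatMap (fun sample => sample.map Prod.fst)).map pvRename) := by
  unfold collect_all_fields
  have hinner : ∀ (sample : List (String × String)) (fields : PySem.Set String),
      sample.foldl (fun fields kv =>
        if kv.1 = "id" then PySem.Set.add fields "api_id" else PySem.Set.add fields kv.1) fields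
        = PySem.Set.update fields (sample.map (fun kv => pvRename kv.1)) := by
    intro sample fields
    rw [PySem.Set.update_map_eq_foldl_add]
    apply PySem.List.foldl_congr_mem
    intro s kv _
    unfold pvRename
    split <;> rfl
  have hmain : ∀ (l : List (List (String × String))) (s : PySem.Set String),
      l.foldl (fun fields sample =>
        sample.foldl (fun fields kv =>
          if kv.1 = "id" then PySem.Set.add fields "api_id" else PySem.Set.add fields kv.1) fields) s
        = PySem.Set.update s (l.flatMap (fun sample => sample.map (fun kv => pvRename kv.1))) := by
    intro l
    induction l with
    | nil => intro s; simp [PySem.Set.update]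
    | cons hd tl ih =>
        intro s
        rw [List.foldl_cons, hinner, ih, List.flatMap_cons, PySem.Set.update_append]
  rw [hmain, PySem.Set.update_empty]
  congr 1
  simp [List.map_flatMap, Function.comp_def]

theorem pv_B_eq (data_samples : List (List (String × String))) :
    collect_all_fields_alt data_samples
      = PySem.Set.ofList ((data_samples.flatMap (fun sample => sample.map Prod.fst)).map pvRename) := by
  induction data_samples with
  | nil => rfl
  | cons head rest ih =>
      simp only [collect_all_fields_alt, ih, List.flatMap_cons, List.map_append,
        PySem.Set.union, PySem.Set.ofList_append]
      rw [pv_update_ofList]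
      congr 1
      simp [List.map_map, Function.comp_def]

-- ===== VERDICT (by name: the statement is the Claim_ definition above) =====
theorem collect_all_fields_spec : Claim_equal_collect_all_fields := by
  intro data_samples _
  unfold Spec_collect_all_fields
  rw [pv_A_eq, pv_B_eq]
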